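-- pv_equiv track=rewrite | github.com/friesandco1-star/OCR-EXTRACTOR | format_records.py | split_pages
-- ===== SOURCE A (Python) =====
-- def split_pages(lines: list[str]) -> list[list[str]]:
--     pages: list[list[str]] = []
--     current: list[str] = []
--     for line in lines:
--         if set(line) == {"="}:
--             if current:
--                 pages.append(current)
--                 current = []
--             continue
--         if line.lower().endswith((".jpg", ".jpeg", ".png", ".tif", ".tiff", ".bmp", ".webp")):
--             continue
--         current.append(line)
--     if current:
--         pages.append(current)
--     return pages
-- ===== SOURCE B (Python) =====
-- IMAGE_EXTS = (".jpg", ".jpeg", ".png", ".tif", ".tiff", ".bmp", ".webp")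
--
--
-- def _is_sep(line: str) -> bool:
--     return line != "" and all(c == "=" for c in line)
--
--
-- def split_pages(lines: list[str]) -> list[list[str]]:
--     pages: list[list[str]] = []
--     i, n = 0, len(lines)
--     while i < n:
--         if _is_sep(lines[i]):
--             i += 1
--             continue
--         j = i
--         while j < n and not _is_sep(lines[j]):
--             j += 1
--         page = [l for l in lines[i:j] if not l.lower().endswith(IMAGE_EXTS)]
--         if page:
--             pages.append(page)
--         i = j
--     return pages
-- ===== Notes on version B (the rewrite author's own statement) =====
-- stated objective: alternative
-- what changed: Replaces A's single pass with a mutable current-page accumulator by a span decomposition: skip separator runs, take each maximal content run with an index scan, filter image names out of the run as a slice comprehension, and keep it if non-empty.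
import Mathlib
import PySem

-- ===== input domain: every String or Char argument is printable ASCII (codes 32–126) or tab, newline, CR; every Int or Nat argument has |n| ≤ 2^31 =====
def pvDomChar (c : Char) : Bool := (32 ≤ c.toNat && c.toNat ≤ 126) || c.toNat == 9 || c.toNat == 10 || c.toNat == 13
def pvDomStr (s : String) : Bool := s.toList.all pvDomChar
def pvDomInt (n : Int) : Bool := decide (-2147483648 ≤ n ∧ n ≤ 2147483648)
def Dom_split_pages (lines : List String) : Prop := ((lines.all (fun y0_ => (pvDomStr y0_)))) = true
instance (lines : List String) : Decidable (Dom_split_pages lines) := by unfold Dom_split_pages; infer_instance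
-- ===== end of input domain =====

-- B replaces A's mutable-accumulator single pass by a span decomposition: skip separator
-- runs, take each maximal content run, filter image names out of it, keep it if non-empty
-- (objective: alternative decomposition, same cost).

-- ===== PORT A =====
def pvIsSepA (s : String) : Bool :=
  PySem.Set.equal (PySem.Set.ofList s.toList) (PySem.Set.ofList ['='])

def pvIsImgA (s : String) : Bool :=
  [".jpg", ".jpeg", ".png", ".tif", ".tiff", ".bmp", ".webp"].any
    (fun e => PySem.Str.endswith (PySem.Str.lower s) e)

def pvGoA (pages : List (List String)) (current : List String) :
    List String → List (List String)
  | [] => if current.isEmpty then pages else pages ++ [current]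
  | l :: ls =>
    if pvIsSepA l then
      if current.isEmpty then pvGoA pages current ls
      else pvGoA (pages ++ [current]) [] ls
    else if pvIsImgA l then pvGoA pages current ls
    else pvGoA pages (current ++ [l]) ls

def split_pages (lines : List String) : List (List String) :=
  pvGoA [] [] lines

-- ===== PORT B =====
def pvImgExts : List String := [".jpg", ".jpeg", ".png", ".tif", ".tiff", ".bmp", ".webp"]

def pvIsSepB (s : String) : Bool :=
  (s != "") && s.toList.all (fun c => c == '=')

def pvIsImgB (s : String) : Bool :=
  pvImgExts.any (fun e => PySem.Str.endswith (PySem.Str.lower s) e)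

def splitB : List String → List (List String)
  | [] => []
  | l :: ls =>
    if pvIsSepB l then splitB ls
    else
      let content := (l :: ls).takeWhile (fun x => !pvIsSepB x)
      let rest := (l :: ls).dropWhile (fun x => !pvIsSepB x)
      let page := content.filter (fun x => !pvIsImgB x)
      (if page.isEmpty then [] else [page]) ++ splitB rest
  termination_by ls => ls.length
  decreasing_by
    · simp
    · rename_i h
      rw [List.dropWhile_cons_of_pos (by simp [h])]
      exact Nat.lt_succ_of_le (List.length_dropWhile_le _ _)

def split_pages_alt (lines : List String) : List (List String) :=
  splitB lines

-- ===== PRECONDITION & SPEC =====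
def Spec_split_pages (lines : List String) (out : List (List String)) : Prop := out = split_pages_alt lines
instance (lines : List String) (out : List (List String)) : Decidable (Spec_split_pages lines out) := by unfold Spec_split_pages; infer_instance

-- ===== CLAIM (what is proved, stated in full; the proofs are below) =====
def Claim_equal_split_pages : Prop := ∀ (lines : List String), Dom_split_pages lines → Spec_split_pages lines (split_pages lines)

-- ===== LEMMAS AND PROOFS =====

theorem sep_eq (s : String) : pvIsSepA s = pvIsSepB s := by
  unfold pvIsSepA pvIsSepB
  rw [Bool.eq_iff_iff]
  simp [PySem.Set.equal_iff, List.all_eq_true]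
  constructor
  · intro h
    refine ⟨?_, fun x hx => (h x).mp hx⟩
    intro hs
    have heq := (h '=').mpr rfl
    rw [hs] at heq
    simp at heq
  · rintro ⟨hne, hall⟩ x
    refine ⟨hall x, ?_⟩
    intro hx
    subst hx
    cases hcase : s.toList with
    | nil => exact absurd (String.toList_eq_nil_iff.mp hcase) hne
    | cons c cs =>
      have hc : c = '=' := hall c (by rw [hcase]; exact List.mem_cons_self)
      rw [← hc]
      exact List.mem_cons_self

theorem img_eq (s : String) : pvIsImgA s = pvIsImgB s := rfl

theorem unfoldB (ls : List String) :
    splitB ls =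
      (let page := (ls.takeWhile (fun x => !pvIsSepB x)).filter (fun x => !pvIsImgB x)
       if page.isEmpty then [] else [page]) ++ splitB (ls.dropWhile (fun x => !pvIsSepB x)) := by
  cases ls with
  | nil => simp [splitB]
  | cons l ls =>
    by_cases h : pvIsSepB l = true
    · rw [List.takeWhile_cons_of_neg (by simp [h]), List.dropWhile_cons_of_neg (by simp [h])]
      simp [splitB, h]
    · simp only [splitB, h]
      simp [h]

theorem goA_eq (ls : List String) (current : List String) (pages : List (List String)) :
    pvGoA pages current ls =
      pages ++
        (let page := current ++ (ls.takeWhile (fun x => !pvIsSepB x)).filter (fun x => !pvIsImgB x)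
         if page.isEmpty then [] else [page]) ++
        splitB (ls.dropWhile (fun x => !pvIsSepB x)) := by
  induction ls generalizing current pages with
  | nil =>
    cases hc : current.isEmpty <;> simp [pvGoA, splitB, hc]
  | cons l ls ih =>
    by_cases hs : pvIsSepB l = true
    · have hsA : pvIsSepA l = true := by rw [sep_eq]; exact hs
      rw [List.takeWhile_cons_of_neg (by simp [hs]), List.dropWhile_cons_of_neg (by simp [hs])]
      have hB : splitB (l :: ls) = splitB ls := by simp [splitB, hs]
      cases hc : current.isEmpty with
      | true =>
        have hcur : current = [] := List.isEmpty_iff.mp hc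
        subst hcur
        simp only [pvGoA, hsA, List.isEmpty_nil, if_pos]
        rw [ih, hB, unfoldB ls]
        simp
      | false =>
        simp only [pvGoA, hsA, hc, Bool.false_eq_true, if_false, if_true]
        rw [ih, hB, unfoldB ls]
        simp [hc]
    · have hsA : pvIsSepA l = false := by rw [sep_eq]; simp [hs]
      rw [List.takeWhile_cons_of_pos (by simp [hs]), List.dropWhile_cons_of_pos (by simp [hs])]
      by_cases hi : pvIsImgA l = true
      · have hiB : pvIsImgB l = true := by rw [← img_eq]; exact hi
        simp only [pvGoA, hsA, hi, if_true, Bool.false_eq_true, if_false]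
        rw [ih]
        simp [hiB]
      · have hiB : pvIsImgB l = false := by rw [← img_eq]; simp [hi]
        simp only [pvGoA, hsA, hi, Bool.false_eq_true, if_false]
        rw [ih]
        simp [hiB]

-- ===== VERDICT (by name: the statement is the Claim_ definition above) =====
theorem split_pages_spec : Claim_equal_split_pages := by
  intro lines _
  unfold Spec_split_pages split_pages split_pages_alt
  rw [goA_eq, unfoldB lines]
  simp
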